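-- pv_equiv track=rewrite | github.com/reinaftali/Colman-Algorithms | Running Task 1/main.py | update_mst
-- ===== SOURCE A (Python) =====
-- def update_mst(mst, new_edge):
--     def find_cycle(graph, start, end):
--         visited = set()
--         path = []
--
--         def dfs(node):
--             visited.add(node)
--             path.append(node)
--             if node == end:
--                 return True
--             for neighbor, _ in graph[node]:
--                 if neighbor not in visited:
--                     if dfs(neighbor):
--                         return True
--             path.pop()
--             return False
--
--         dfs(start)
--         return path if path[-1] == end else None
--
--     graph = {}
--     for u, v, weight in mst:
--         if u not in graph: graph[u] = []
--         if v not in graph: graph[v] = []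
--         graph[u].append((v, weight))
--         graph[v].append((u, weight))
--
--     u, v, weight = new_edge
--     if u not in graph: graph[u] = []
--     if v not in graph: graph[v] = []
--     graph[u].append((v, weight))
--     graph[v].append((u, weight))
--
--     cycle = find_cycle(graph, u, v)
--
--     if not cycle:
--         mst.append(new_edge)
--         return mst
--
--     max_edge = max([(cycle[i], cycle[i + 1]) for i in range(len(cycle) - 1)],
--                    key=lambda e: next(w for n, w in graph[e[0]] if n == e[1]))
--     max_weight = next(w for n, w in graph[max_edge[0]] if n == max_edge[1])
--
--     if weight < max_weight:
--         mst = [edge for edge in mst if set(edge[:2]) != set(max_edge)]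
--         mst.append(new_edge)
--
--     return mst
-- ===== SOURCE B (Python) =====
-- def update_mst(mst, new_edge):
--     # Build adjacency lists (same insertion discipline as the original).
--     graph = {}
--     for a, b, w in mst:
--         if a not in graph: graph[a] = []
--         if b not in graph: graph[b] = []
--         graph[a].append((b, w))
--         graph[b].append((a, w))
--     u, v, weight = new_edge
--     if u not in graph: graph[u] = []
--     if v not in graph: graph[v] = []
--     graph[u].append((v, weight))
--     graph[v].append((u, weight))
--
--     # Iterative DFS with an explicit stack; each entry carries the whole
--     # path from u to its node.  Neighbors are pushed in reversed order so
--     # nodes are discovered in the recursive left-to-right order.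
--     visited = set()
--     stack = [[u]]
--     path = None
--     while stack:
--         p = stack.pop()
--         node = p[-1]
--         if node in visited:
--             continue
--         visited.add(node)
--         if node == v:
--             path = p
--             break
--         for nb, _ in reversed(graph[node]):
--             if nb not in visited:
--                 stack.append(p + [nb])
--
--     # Single pass over the path edges keeping the first heaviest one.
--     best = None
--     for a, b in zip(path, path[1:]):
--         w = next(w2 for n, w2 in graph[a] if n == b)
--         if best is None or w > best[0]:
--             best = (w, (a, b))
--     max_weight, max_edge = best
--
--     if weight < max_weight:
--         mst = [e for e in mst if set(e[:2]) != set(max_edge)]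
--         mst.append(new_edge)
--     return mst
-- ===== Notes on version B (the rewrite author's own statement) =====
-- stated objective: alternative
-- what changed: A's recursive DFS with a shared mutable visited set and path list is replaced by an iterative explicit-stack DFS whose stack entries carry their whole path (neighbors pushed in reversed order to preserve the discovery order), and A's max(..., key=...) over the path edges plus a second next() lookup is replaced by a single fold keeping the (weight, edge) pair of the first heaviest edge.
import Mathlib
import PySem

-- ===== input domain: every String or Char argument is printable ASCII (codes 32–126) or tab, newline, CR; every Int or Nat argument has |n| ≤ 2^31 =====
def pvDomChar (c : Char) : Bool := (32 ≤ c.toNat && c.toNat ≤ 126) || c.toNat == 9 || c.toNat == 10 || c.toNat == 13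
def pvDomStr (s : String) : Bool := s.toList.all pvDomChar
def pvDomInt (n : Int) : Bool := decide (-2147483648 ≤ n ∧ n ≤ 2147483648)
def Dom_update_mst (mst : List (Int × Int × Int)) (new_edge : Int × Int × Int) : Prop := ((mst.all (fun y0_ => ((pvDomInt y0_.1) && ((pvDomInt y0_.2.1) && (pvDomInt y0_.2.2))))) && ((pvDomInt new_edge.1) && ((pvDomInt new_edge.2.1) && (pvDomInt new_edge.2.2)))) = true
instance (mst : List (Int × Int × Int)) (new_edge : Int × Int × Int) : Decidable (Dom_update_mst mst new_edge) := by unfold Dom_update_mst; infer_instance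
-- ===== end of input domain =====

-- B replaces A's recursive cycle-finding DFS by an iterative explicit-stack DFS whose
-- stack entries carry their whole path, and A's max(..., key=...) plus second lookup by
-- a single fold keeping (weight, edge); equal return value on every admitted input.

-- ===== PORT A =====
abbrev PvGraph : Type := PySem.Dict Int (List (Int × Int))

-- `if u not in graph: graph[u] = []` (twice) then the two appends, for one edge
def pvAddEdge (g : PvGraph) (a b w : Int) : PvGraph :=
  let g1 := if g.contains a then g else g.insert a []
  let g2 := if g1.contains b then g1 else g1.insert b []
  let g3 := g2.modify a [] (fun l => l ++ [(b, w)])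
  g3.modify b [] (fun l => l ++ [(a, w)])

def pvBuildGraph (mst : List (Int × Int × Int)) (e : Int × Int × Int) : PvGraph :=
  pvAddEdge (mst.foldl (fun g t => pvAddEdge g t.1 t.2.1 t.2.2) PySem.Dict.empty) e.1 e.2.1 e.2.2

mutual
-- A's nested recursive `dfs` (the fuel only guards termination; it is never exhausted
-- with the fuel update_mst passes); state (visited, path) threaded as Python mutates it
def pvDfs (g : PvGraph) (endN : Int) : Nat → Int → PySem.Set Int → List Int → Bool × PySem.Set Int × List Int
  | 0, _, vis, path => (false, vis, path)
  | fuel+1, node, vis, path =>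
    let vis1 := PySem.Set.add vis node
    let path1 := path ++ [node]
    if node = endN then (true, vis1, path1)
    else
      match pvDfsLoop g endN fuel (g.getD node []) vis1 path1 with
      | (true, vis', path') => (true, vis', path')
      | (false, vis', path') => (false, vis', path'.dropLast)
  termination_by fuel _ _ _ => (fuel, 0)
-- `for neighbor, _ in graph[node]: if neighbor not in visited: if dfs(neighbor): return True`
def pvDfsLoop (g : PvGraph) (endN : Int) : Nat → List (Int × Int) → PySem.Set Int → List Int → Bool × PySem.Set Int × List Int
  | _, [], vis, path => (false, vis, path)
  | fuel, q :: rest, vis, path =>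
    if PySem.Set.contains vis q.1 then pvDfsLoop g endN fuel rest vis path
    else
      match pvDfs g endN fuel q.1 vis path with
      | (true, vis', path') => (true, vis', path')
      | (false, vis', path') => pvDfsLoop g endN fuel rest vis' path'
  termination_by fuel l _ _ => (fuel, l.length + 1)
end

def update_mst (mst : List (Int × Int × Int)) (new_edge : Int × Int × Int) : List (Int × Int × Int) :=
  let g := pvBuildGraph mst new_edge
  let v := new_edge.2.1
  let r := pvDfs g v (g.keys.length + 1) new_edge.1 PySem.Set.empty []
  -- `return path if path[-1] == end else None` (IndexError on empty path = none)
  let cycle : Option (List Int) :=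
    match PySem.List.pyGet? r.2.2 (-1) with
    | some x => if x = v then some r.2.2 else none
    | none => none
  match cycle with
  | none => mst ++ [new_edge]
  | some cyc =>
    -- `key=lambda e: next(w for n, w in graph[e[0]] if n == e[1])`
    let key : Int × Int → Int := fun e =>
      ((((g.getD e.1 []).find? (fun q => q.1 == e.2)).map Prod.snd).getD 0)
    match PySem.List.max? ((List.range (cyc.length - 1)).map
        (fun i => (cyc.getD i 0, cyc.getD (i+1) 0))) key with
    | none => mst
    | some maxEdge =>
      if new_edge.2.2 < key maxEdge then
        (mst.filter (fun e =>
          !(PySem.Set.equal (PySem.Set.ofList [e.1, e.2.1])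
                            (PySem.Set.ofList [maxEdge.1, maxEdge.2])))) ++ [new_edge]
      else mst

-- ===== PORT B =====
-- helper lemmas cited by pvStackLoop's decreasing_by (so they live above the port)
lemma pv_length_filter_le {l : List Int} {p q : Int → Bool}
    (himp : ∀ x ∈ l, q x = true → p x = true) :
    (l.filter q).length ≤ (l.filter p).length := by
  simpa [← List.countP_eq_length_filter] using List.countP_mono_left himp

lemma pv_length_filter_lt {l : List Int} {p q : Int → Bool}
    (himp : ∀ x, q x = true → p x = true) {a : Int} (ha : a ∈ l)
    (hpa : p a = true) (hqa : ¬ q a = true) :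
    (l.filter q).length < (l.filter p).length := by
  induction l with
  | nil => cases ha
  | cons x t ih =>
    by_cases hqx : q x = true
    · have hpx : p x = true := himp x hqx
      have hat : a ∈ t := by
        rcases List.mem_cons.1 ha with rfl | h
        · exact absurd hqx hqa
        · exact h
      simp only [List.filter_cons, hqx, hpx, if_pos, List.length_cons]
      exact Nat.succ_lt_succ (ih hat)
    · have hle : (t.filter q).length ≤ (t.filter p).length :=
        pv_length_filter_le (fun y _ hy => himp y hy)
      by_cases hpx : p x = true
      · have : (t.filter q).length ≤ (t.filter p).length := hle
        rcases List.mem_cons.1 ha with rfl | hat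
        · simp [List.filter_cons, hqx, hpx]; omega
        · have := ih hat
          simp [List.filter_cons, hqx, hpx]; omega
      · have hat : a ∈ t := by
          rcases List.mem_cons.1 ha with rfl | h
          · exact absurd hpa hpx
          · exact h
        simpa [List.filter_cons, hqx, hpx] using ih hat

-- number of keys of g not yet visited: the termination measure of the stack loop
def pvMu (g : PvGraph) (vis : PySem.Set Int) : Nat :=
  (g.keys.filter (fun k => !(PySem.Set.contains vis k))).length

lemma pv_mu_add_lt {g : PvGraph} {vis : PySem.Set Int} {node : Int}
    (hk : g.contains node = true) (hv : ¬ PySem.Set.contains vis node = true) :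
    pvMu g (PySem.Set.add vis node) < pvMu g vis := by
  apply pv_length_filter_lt (a := node)
  · intro x hx
    simp only [PySem.Set.contains, List.contains_eq_mem, Bool.not_eq_true',
      decide_eq_false_iff_not] at hx ⊢
    exact fun hmem => hx ((PySem.Set.mem_add vis node x).2 (Or.inl hmem))
  · exact (PySem.Dict.contains_iff_mem_keys g node).1 hk
  · simpa [PySem.Set.contains, List.contains_eq_mem] using hv
  · simp [PySem.Set.contains, List.contains_eq_mem,
      (PySem.Set.mem_add vis node node).2 (Or.inr rfl)]

-- B's `while stack:` loop; each entry carries the whole path to its node; the two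
-- `none` exits are Python's IndexError/KeyError, unreachable from update_mst_alt
def pvStackLoop (g : PvGraph) (endN : Int) : List (List Int) → PySem.Set Int → Option (List Int)
  | [], _ => none
  | p :: stack, vis =>
    match PySem.List.pyGet? p (-1) with
    | none => pvStackLoop g endN stack vis
    | some node =>
      if hv : PySem.Set.contains vis node then pvStackLoop g endN stack vis
      else
        let vis' := PySem.Set.add vis node
        if node = endN then some p
        else
          if hk : g.contains node = true then
            pvStackLoop g endN
              ((g.getD node []).reverse.foldl
                (fun st q => if PySem.Set.contains vis' q.1 then st else (p ++ [q.1]) :: st)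
                stack) vis'
          else none
  termination_by stack vis => (pvMu g vis, stack.length)
  decreasing_by
  all_goals simp_wf
  · exact Prod.Lex.right _ (Nat.lt_succ_self _)
  · exact Prod.Lex.left _ _ (pv_mu_add_lt hk (by simpa using hv))

-- loop body of B's single best-keeping pass: `if best is None or w > best[0]: best = (w, e)`
def pvBestFold (wOf : Int × Int → Int) (best : Option (Int × (Int × Int))) (e : Int × Int) :
    Option (Int × (Int × Int)) :=
  match best with
  | none => some (wOf e, e)
  | some (bw, be) => if wOf e > bw then some (wOf e, e) else some (bw, be)

def update_mst_alt (mst : List (Int × Int × Int)) (new_edge : Int × Int × Int) : List (Int × Int × Int) :=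
  let g := pvBuildGraph mst new_edge
  let v := new_edge.2.1
  match pvStackLoop g v [[new_edge.1]] PySem.Set.empty with
  | none => mst   -- Python B would raise here; unreachable (the direct new edge reaches v)
  | some path =>
    -- `w = next(w2 for n, w2 in graph[a] if n == b)`
    let wOf : Int × Int → Int := fun e =>
      ((((g.getD e.1 []).find? (fun q => q.1 == e.2)).map Prod.snd).getD 0)
    -- single pass over zip(path, path[1:]) keeping the first heaviest edge
    match (path.zip path.tail).foldl (pvBestFold wOf) none with
    | none => mst   -- Python B would raise here (no path edges); unreachable under Pre_
    | some (maxWeight, maxEdge) =>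
      if new_edge.2.2 < maxWeight then
        (mst.filter (fun e =>
          !(PySem.Set.equal (PySem.Set.ofList [e.1, e.2.1])
                            (PySem.Set.ofList [maxEdge.1, maxEdge.2])))) ++ [new_edge]
      else mst

-- ===== PRECONDITION & SPEC =====
-- Pre_ excludes exactly the self-loop new edges (u == v): there A raises ValueError
-- (max() of an empty sequence) and B raises TypeError, so neither returns a value.
def Pre_update_mst (mst : List (Int × Int × Int)) (new_edge : Int × Int × Int) : Prop :=
  new_edge.1 ≠ new_edge.2.1
instance (mst : List (Int × Int × Int)) (new_edge : Int × Int × Int) : Decidable (Pre_update_mst mst new_edge) := by unfold Pre_update_mst; infer_instance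

def pvWitness_update_mst : (List (Int × Int × Int)) × (Int × Int × Int) :=
  ([(1, 2, 1), (2, 3, 2)], (1, 3, 4))

def Spec_update_mst (mst : List (Int × Int × Int)) (new_edge : Int × Int × Int) (out : List (Int × Int × Int)) : Prop := out = update_mst_alt mst new_edge
instance (mst : List (Int × Int × Int)) (new_edge : Int × Int × Int) (out : List (Int × Int × Int)) : Decidable (Spec_update_mst mst new_edge out) := by unfold Spec_update_mst; infer_instance

-- ===== CLAIM (what is proved, stated in full; the proofs are below) =====
def Claim_equal_update_mst : Prop := ∀ (mst : List (Int × Int × Int)) (new_edge : Int × Int × Int), Dom_update_mst mst new_edge → Pre_update_mst mst new_edge → Spec_update_mst mst new_edge (update_mst mst new_edge)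

-- ===== LEMMAS AND PROOFS =====

-- set inclusion on PySem.Set (membership form)
def pvSub (s t : PySem.Set Int) : Prop := ∀ x : Int, x ∈ s → x ∈ t

lemma pvSub_refl (s : PySem.Set Int) : pvSub s s := fun _ h => h
lemma pvSub_trans {s t u : PySem.Set Int} (h1 : pvSub s t) (h2 : pvSub t u) : pvSub s u :=
  fun x hx => h2 x (h1 x hx)
lemma pvSub_add (s : PySem.Set Int) (x : Int) : pvSub s (PySem.Set.add s x) :=
  fun y hy => (PySem.Set.mem_add s x y).2 (Or.inl hy)

lemma pv_mu_anti {g : PvGraph} {s t : PySem.Set Int} (h : pvSub s t) :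
    pvMu g t ≤ pvMu g s := by
  apply pv_length_filter_le
  intro x _ hx
  simp only [PySem.Set.contains, List.contains_eq_mem, Bool.not_eq_true',
    decide_eq_false_iff_not] at hx ⊢
  exact fun hmem => hx (h x hmem)

lemma pv_mu_pos {g : PvGraph} {vis : PySem.Set Int} {node : Int}
    (hk : g.contains node = true) (hv : ¬ PySem.Set.contains vis node = true) :
    1 ≤ pvMu g vis := by
  have hm : node ∈ g.keys.filter (fun k => !(PySem.Set.contains vis k)) :=
    List.mem_filter.2 ⟨(PySem.Dict.contains_iff_mem_keys g node).1 hk, by simpa using hv⟩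
  exact List.length_pos_of_mem hm

-- good graph: every neighbor named in an adjacency list is itself a key
def pvGood (g : PvGraph) : Prop :=
  ∀ k : Int, ∀ q ∈ g.getD k ([] : List (Int × Int)), g.contains q.1 = true

-- pushing reversed with a per-element guard = prepending the filtered mapped list
lemma pv_foldpush {α β : Type} (L : List α) (c : α → Bool) (f : α → β) (st : List β) :
    L.reverse.foldl (fun st q => if c q then st else f q :: st) st
      = (L.filter (fun q => !c q)).map f ++ st := by
  rw [List.foldl_reverse]
  induction L with
  | nil => rfl
  | cons x t ih => by_cases hc : c x <;> simp [hc, ih]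

-- visited only grows
lemma pv_mono (g : PvGraph) (endN : Int) : ∀ fuel : Nat,
    (∀ node vis path, pvSub vis (pvDfs g endN fuel node vis path).2.1)
    ∧ (∀ l vis path, pvSub vis (pvDfsLoop g endN fuel l vis path).2.1) := by
  intro fuel
  induction fuel with
  | zero =>
    have hd : ∀ node vis path, pvSub vis (pvDfs g endN 0 node vis path).2.1 := by
      intro node vis path; rw [pvDfs]; exact pvSub_refl _
    refine ⟨hd, ?_⟩
    intro l
    induction l with
    | nil => intro vis path; rw [pvDfsLoop]; exact pvSub_refl _
    | cons q rest ih =>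
      intro vis path
      rw [pvDfsLoop]
      by_cases hc : PySem.Set.contains vis q.1 = true
      · rw [if_pos hc]; exact ih vis path
      · rw [if_neg hc]
        rcases h : pvDfs g endN 0 q.1 vis path with ⟨b, vis', p'⟩
        have hsub : pvSub vis vis' := by
          have := hd q.1 vis path; rw [h] at this; exact this
        cases b
        · simpa using pvSub_trans hsub (ih vis' p')
        · simpa using hsub
  | succ f ihf =>
    have hd : ∀ node vis path, pvSub vis (pvDfs g endN (f+1) node vis path).2.1 := by
      intro node vis path
      rw [pvDfs]
      by_cases he : node = endN
      · simpa [he] using pvSub_add vis node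
      · simp only [he, if_false]
        rcases h : pvDfsLoop g endN f (g.getD node []) (PySem.Set.add vis node) (path ++ [node])
          with ⟨b, vis', p'⟩
        have hsub : pvSub (PySem.Set.add vis node) vis' := by
          have := ihf.2 (g.getD node []) (PySem.Set.add vis node) (path ++ [node])
          rw [h] at this; exact this
        have hsub2 : pvSub vis vis' := pvSub_trans (pvSub_add vis node) hsub
        cases b <;> simpa using hsub2
    refine ⟨hd, ?_⟩
    intro l
    induction l with
    | nil => intro vis path; rw [pvDfsLoop]; exact pvSub_refl _
    | cons q rest ih =>
      intro vis path
      rw [pvDfsLoop]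
      by_cases hc : PySem.Set.contains vis q.1 = true
      · rw [if_pos hc]; exact ih vis path
      · rw [if_neg hc]
        rcases h : pvDfs g endN (f+1) q.1 vis path with ⟨b, vis', p'⟩
        have hsub : pvSub vis vis' := by
          have := hd q.1 vis path; rw [h] at this; exact this
        cases b
        · simpa using pvSub_trans hsub (ih vis' p')
        · simpa using hsub

-- a failed call restores the path
lemma pv_path_false (g : PvGraph) (endN : Int) : ∀ fuel : Nat,
    (∀ node vis path vis' p', pvDfs g endN fuel node vis path = (false, vis', p') → p' = path)
    ∧ (∀ l vis path vis' p', pvDfsLoop g endN fuel l vis path = (false, vis', p') → p' = path) := by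
  intro fuel
  induction fuel with
  | zero =>
    have hd : ∀ node vis path vis' p',
        pvDfs g endN 0 node vis path = (false, vis', p') → p' = path := by
      intro node vis path vis' p' h; rw [pvDfs] at h
      simp only [Prod.mk.injEq] at h; exact h.2.2.symm
    refine ⟨hd, ?_⟩
    intro l
    induction l with
    | nil =>
      intro vis path vis' p' h; rw [pvDfsLoop] at h
      simp only [Prod.mk.injEq] at h; exact h.2.2.symm
    | cons q rest ih =>
      intro vis path vis' p' h
      rw [pvDfsLoop] at h
      by_cases hc : PySem.Set.contains vis q.1 = true
      · rw [if_pos hc] at h; exact ih vis path vis' p' h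
      · rw [if_neg hc] at h
        split at h
        · simp at h
        · rename_i a b heq
          have hb : b = path := hd q.1 vis path a b heq
          exact hb ▸ ih a b vis' p' h
  | succ f ihf =>
    have hd : ∀ node vis path vis' p',
        pvDfs g endN (f+1) node vis path = (false, vis', p') → p' = path := by
      intro node vis path vis' p' h
      rw [pvDfs] at h
      by_cases he : node = endN
      · simp [he] at h
      · simp only [he, if_false] at h
        split at h
        · simp at h
        · rename_i a b heq
          have hb : b = path ++ [node] :=
            ihf.2 (g.getD node []) (PySem.Set.add vis node) (path ++ [node]) a b heq
          simp only [Prod.mk.injEq] at h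
          rw [← h.2.2, hb]
          exact List.dropLast_concat
    refine ⟨hd, ?_⟩
    intro l
    induction l with
    | nil =>
      intro vis path vis' p' h; rw [pvDfsLoop] at h
      simp only [Prod.mk.injEq] at h; exact h.2.2.symm
    | cons q rest ih =>
      intro vis path vis' p' h
      rw [pvDfsLoop] at h
      by_cases hc : PySem.Set.contains vis q.1 = true
      · rw [if_pos hc] at h; exact ih vis path vis' p' h
      · rw [if_neg hc] at h
        split at h
        · simp at h
        · rename_i a b heq
          have hb : b = path := hd q.1 vis path a b heq
          exact hb ▸ ih a b vis' p' h

-- a failed call never visits endN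
lemma pv_endvis_false (g : PvGraph) (endN : Int) : ∀ fuel : Nat,
    (∀ node vis path vis' p', pvDfs g endN fuel node vis path = (false, vis', p') →
       PySem.Set.contains vis' endN = PySem.Set.contains vis endN)
    ∧ (∀ l vis path vis' p', pvDfsLoop g endN fuel l vis path = (false, vis', p') →
       PySem.Set.contains vis' endN = PySem.Set.contains vis endN) := by
  intro fuel
  induction fuel with
  | zero =>
    have hd : ∀ node vis path vis' p', pvDfs g endN 0 node vis path = (false, vis', p') →
        PySem.Set.contains vis' endN = PySem.Set.contains vis endN := by
      intro node vis path vis' p' h; rw [pvDfs] at h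
      simp only [Prod.mk.injEq] at h; rw [← h.2.1]
    refine ⟨hd, ?_⟩
    intro l
    induction l with
    | nil =>
      intro vis path vis' p' h; rw [pvDfsLoop] at h
      simp only [Prod.mk.injEq] at h; rw [← h.2.1]
    | cons q rest ih =>
      intro vis path vis' p' h
      rw [pvDfsLoop] at h
      by_cases hc : PySem.Set.contains vis q.1 = true
      · rw [if_pos hc] at h; exact ih vis path vis' p' h
      · rw [if_neg hc] at h
        split at h
        · simp at h
        · rename_i a b heq
          rw [ih a b vis' p' h, hd q.1 vis path a b heq]
  | succ f ihf =>
    have hd : ∀ node vis path vis' p', pvDfs g endN (f+1) node vis path = (false, vis', p') →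
        PySem.Set.contains vis' endN = PySem.Set.contains vis endN := by
      intro node vis path vis' p' h
      rw [pvDfs] at h
      by_cases he : node = endN
      · simp [he] at h
      · simp only [he, if_false] at h
        split at h
        · simp at h
        · rename_i a b heq
          have h1 : PySem.Set.contains a endN
              = PySem.Set.contains (PySem.Set.add vis node) endN :=
            ihf.2 (g.getD node []) (PySem.Set.add vis node) (path ++ [node]) a b heq
          have h2 : PySem.Set.contains (PySem.Set.add vis node) endN
              = PySem.Set.contains vis endN := by
            simp only [PySem.Set.contains, List.contains_eq_mem, decide_eq_decide,
              PySem.Set.mem_add]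
            constructor
            · rintro (hm | rfl)
              · exact hm
              · exact absurd rfl he
            · exact Or.inl
          simp only [Prod.mk.injEq] at h
          rw [← h.2.1, h1, h2]
    refine ⟨hd, ?_⟩
    intro l
    induction l with
    | nil =>
      intro vis path vis' p' h; rw [pvDfsLoop] at h
      simp only [Prod.mk.injEq] at h; rw [← h.2.1]
    | cons q rest ih =>
      intro vis path vis' p' h
      rw [pvDfsLoop] at h
      by_cases hc : PySem.Set.contains vis q.1 = true
      · rw [if_pos hc] at h; exact ih vis path vis' p' h
      · rw [if_neg hc] at h
        split at h
        · simp at h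
        · rename_i a b heq
          rw [ih a b vis' p' h, hd q.1 vis path a b heq]

-- a successful call's path ends at endN
lemma pv_last_true (g : PvGraph) (endN : Int) : ∀ fuel : Nat,
    (∀ node vis path vis' p', pvDfs g endN fuel node vis path = (true, vis', p') →
       p'.getLast? = some endN)
    ∧ (∀ l vis path vis' p', pvDfsLoop g endN fuel l vis path = (true, vis', p') →
       p'.getLast? = some endN) := by
  intro fuel
  induction fuel with
  | zero =>
    have hd : ∀ node vis path vis' p', pvDfs g endN 0 node vis path = (true, vis', p') →
        p'.getLast? = some endN := by
      intro node vis path vis' p' h; rw [pvDfs] at h; simp at h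
    refine ⟨hd, ?_⟩
    intro l
    induction l with
    | nil => intro vis path vis' p' h; rw [pvDfsLoop] at h; simp at h
    | cons q rest ih =>
      intro vis path vis' p' h
      rw [pvDfsLoop] at h
      by_cases hc : PySem.Set.contains vis q.1 = true
      · rw [if_pos hc] at h; exact ih vis path vis' p' h
      · rw [if_neg hc] at h
        split at h
        · rename_i a b heq
          simp only [Prod.mk.injEq] at h
          rw [← h.2.2]
          exact hd q.1 vis path a b heq
        · rename_i a b heq
          exact ih a b vis' p' h
  | succ f ihf =>
    have hd : ∀ node vis path vis' p', pvDfs g endN (f+1) node vis path = (true, vis', p') →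
        p'.getLast? = some endN := by
      intro node vis path vis' p' h
      rw [pvDfs] at h
      by_cases he : node = endN
      · simp only [he, if_true, if_pos, Prod.mk.injEq] at h
        rw [← h.2.2]
        exact List.getLast?_concat
      · simp only [he, if_false] at h
        split at h
        · rename_i a b heq
          simp only [Prod.mk.injEq] at h
          rw [← h.2.2]
          exact ihf.2 (g.getD node []) (PySem.Set.add vis node) (path ++ [node]) a b heq
        · simp at h
    refine ⟨hd, ?_⟩
    intro l
    induction l with
    | nil => intro vis path vis' p' h; rw [pvDfsLoop] at h; simp at h
    | cons q rest ih =>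
      intro vis path vis' p' h
      rw [pvDfsLoop] at h
      by_cases hc : PySem.Set.contains vis q.1 = true
      · rw [if_pos hc] at h; exact ih vis path vis' p' h
      · rw [if_neg hc] at h
        split at h
        · rename_i a b heq
          simp only [Prod.mk.injEq] at h
          rw [← h.2.2]
          exact hd q.1 vis path a b heq
        · rename_i a b heq
          exact ih a b vis' p' h

-- contains respects pvSub
lemma pv_sub_contains {s t : PySem.Set Int} (h : pvSub s t) {x : Int}
    (hx : PySem.Set.contains s x = true) : PySem.Set.contains t x = true := by
  simp only [PySem.Set.contains, List.contains_eq_mem, decide_eq_true_eq] at hx ⊢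
  exact h x hx

-- if endN is an unvisited neighbor in the pending list, the loop succeeds
lemma pv_loop_succ (g : PvGraph) (endN : Int) (fuel : Nat) :
    ∀ (l : List (Int × Int)) (vis : PySem.Set Int) (path : List Int),
      pvGood g → (∀ q ∈ l, g.contains q.1 = true) → endN ∈ l.map Prod.fst →
      ¬ PySem.Set.contains vis endN = true → pvMu g vis ≤ fuel →
      (pvDfsLoop g endN fuel l vis path).1 = true := by
  intro l
  induction l with
  | nil => intro vis path _ _ hm _ _; simp at hm
  | cons q rest ih =>
    intro vis path hgg hk hm hv hmu
    rw [pvDfsLoop]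
    by_cases hc : PySem.Set.contains vis q.1 = true
    · rw [if_pos hc]
      have hne : ¬ endN = q.1 := fun h => hv (h ▸ hc)
      have hm' : endN ∈ rest.map Prod.fst := by
        simp only [List.map_cons, List.mem_cons] at hm
        exact hm.resolve_left hne
      exact ih vis path hgg (fun r hr => hk r (List.mem_cons_of_mem _ hr)) hm' hv hmu
    · rw [if_neg hc]
      split
      · rfl
      · rename_i a b heq
        by_cases hqe : q.1 = endN
        · exfalso
          have h1 : 1 ≤ pvMu g vis := pv_mu_pos (hk q List.mem_cons_self) hc
          obtain ⟨f, rfl⟩ : ∃ f, fuel = f + 1 := ⟨fuel - 1, by omega⟩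
          rw [pvDfs] at heq
          simp [hqe] at heq
        · have hm' : endN ∈ rest.map Prod.fst := by
            simp only [List.map_cons, List.mem_cons] at hm
            exact hm.resolve_left (fun h => hqe h.symm)
          have hmono : pvSub vis a := by
            have := (pv_mono g endN fuel).1 q.1 vis path
            rw [heq] at this; simpa using this
          have hvis' : ¬ PySem.Set.contains a endN = true := by
            rw [(pv_endvis_false g endN fuel).1 q.1 vis path a b heq]
            exact hv
          exact ih a b hgg (fun r hr => hk r (List.mem_cons_of_mem _ hr)) hm' hvis'
            (le_trans (pv_mu_anti hmono) hmu)

-- the simulation, loop side: if the recursion's pending neighbor list corresponds to the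
-- top stack segment (filtered at push time by visP ⊆ vis), both machines agree
lemma pv_corr_loop (g : PvGraph) (endN : Int) (hg : pvGood g) (fuel : Nat)
    (hd : ∀ node vis path stack, g.contains node = true →
      ¬ PySem.Set.contains vis node = true → pvMu g vis ≤ fuel →
      pvStackLoop g endN ((path ++ [node]) :: stack) vis
        = (match pvDfs g endN fuel node vis path with
           | (true, _, p) => some p
           | (false, vis', _) => pvStackLoop g endN stack vis')) :
    ∀ (l : List (Int × Int)) (vis visP : PySem.Set Int) (path1 : List Int)
      (stack : List (List Int)),
      (∀ q ∈ l, g.contains q.1 = true) → pvSub visP vis → pvMu g vis ≤ fuel →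
      pvStackLoop g endN
          ((l.filter (fun q => !(PySem.Set.contains visP q.1))).map (fun q => path1 ++ [q.1]) ++ stack) vis
        = (match pvDfsLoop g endN fuel l vis path1 with
           | (true, _, p) => some p
           | (false, vis', _) => pvStackLoop g endN stack vis') := by
  intro l
  induction l with
  | nil =>
    intro vis visP path1 stack _ _ _
    rw [pvDfsLoop]
    simp
  | cons q rest ih =>
    intro vis visP path1 stack hk hsub hmu
    have hkrest : ∀ r ∈ rest, g.contains r.1 = true :=
      fun r hr => hk r (List.mem_cons_of_mem _ hr)
    by_cases hPv : PySem.Set.contains visP q.1 = true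
    · have hcv : PySem.Set.contains vis q.1 = true := pv_sub_contains hsub hPv
      have hPm : q.1 ∈ visP := by
        simpa [PySem.Set.contains, List.contains_eq_mem] using hPv
      have hfil : (q :: rest).filter (fun r => !(PySem.Set.contains visP r.1))
          = rest.filter (fun r => !(PySem.Set.contains visP r.1)) := by
        simp [List.filter_cons, PySem.Set.contains, List.contains_eq_mem, hPm]
      rw [pvDfsLoop, if_pos hcv, hfil]
      exact ih vis visP path1 stack hkrest hsub hmu
    · have hPm : q.1 ∉ visP := by
        simpa [PySem.Set.contains, List.contains_eq_mem] using hPv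
      have hfil : (q :: rest).filter (fun r => !(PySem.Set.contains visP r.1))
          = q :: rest.filter (fun r => !(PySem.Set.contains visP r.1)) := by
        simp [List.filter_cons, PySem.Set.contains, List.contains_eq_mem, hPm]
      rw [hfil, List.map_cons, List.cons_append]
      by_cases hcv : PySem.Set.contains vis q.1 = true
      · -- pushed but already visited at pop time: B pops and skips, A's guard skips
        rw [pvDfsLoop, if_pos hcv]
        rw [pvStackLoop, PySem.List.pyGet?_neg_one_append_singleton]
        simp only [dif_pos hcv]
        exact ih vis visP path1 stack hkrest hsub hmu
      · -- unvisited: both machines descend into q.1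
        have hkey : g.contains q.1 = true := hk q List.mem_cons_self
        rw [hd q.1 vis path1
          ((rest.filter (fun r => !(PySem.Set.contains visP r.1))).map (fun r => path1 ++ [r.1]) ++ stack)
          hkey hcv hmu]
        rw [pvDfsLoop, if_neg hcv]
        rcases hres : pvDfs g endN fuel q.1 vis path1 with ⟨b, vis2, p2⟩
        cases b
        · have hp2 : p2 = path1 := (pv_path_false g endN fuel).1 q.1 vis path1 vis2 p2 hres
          have hmono : pvSub vis vis2 := by
            have := (pv_mono g endN fuel).1 q.1 vis path1
            rw [hres] at this; simpa using this
          rw [hp2]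
          simpa using ih vis2 visP path1 stack hkrest
            (pvSub_trans hsub hmono) (le_trans (pv_mu_anti hmono) hmu)
        · simp

-- the simulation: the stack machine computes exactly what the recursion computes
lemma pv_corr (g : PvGraph) (endN : Int) (hg : pvGood g) : ∀ fuel : Nat,
    ∀ node vis path stack, g.contains node = true →
      ¬ PySem.Set.contains vis node = true → pvMu g vis ≤ fuel →
      pvStackLoop g endN ((path ++ [node]) :: stack) vis
        = (match pvDfs g endN fuel node vis path with
           | (true, _, p) => some p
           | (false, vis', _) => pvStackLoop g endN stack vis') := by
  intro fuel
  induction fuel with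
  | zero =>
    intro node vis path stack hk hv hmu
    exact absurd hmu (by have := pv_mu_pos hk hv; omega)
  | succ f ihf =>
    intro node vis path stack hk hv hmu
    rw [pvStackLoop, PySem.List.pyGet?_neg_one_append_singleton]
    simp only [dif_neg hv]
    rw [pvDfs]
    by_cases he : node = endN
    · simp [he]
    · simp only [he, if_false]
      rw [dif_pos hk, pv_foldpush]
      have hmu' : pvMu g (PySem.Set.add vis node) ≤ f := by
        have := pv_mu_add_lt hk hv; omega
      have hloop := pv_corr_loop g endN hg f ihf (g.getD node [])
        (PySem.Set.add vis node) (PySem.Set.add vis node) (path ++ [node]) stack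
        (fun q hq => hg node q hq) (pvSub_refl _) hmu'
      rw [hloop]
      rcases hres : pvDfsLoop g endN f (g.getD node []) (PySem.Set.add vis node) (path ++ [node])
        with ⟨b, vis2, p2⟩
      cases b <;> simp

-- ensuring a key with `if u not in graph: graph[u] = []` changes no getD-with-[]
lemma pv_getD_ensure (g : PvGraph) (a k : Int) :
    (if g.contains a then g else g.insert a ([] : List (Int × Int))).getD k [] = g.getD k [] := by
  by_cases hc : g.contains a
  · simp [hc]
  · by_cases hk : k = a
    · subst hk
      have h0 : g.getD k [] = [] := by
        simp [PySem.Dict.getD, (PySem.Dict.get?_eq_none_iff_contains g k).2 (by simpa using hc)]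
      simp [hc, h0, PySem.Dict.getD_insert_self]
    · simp [hc, PySem.Dict.getD_insert_of_ne g _ _ hk]

lemma pv_contains_ensure (g : PvGraph) (a k : Int) :
    (if g.contains a then g else g.insert a ([] : List (Int × Int))).contains k
      = (g.contains k || k == a) := by
  by_cases hc : g.contains a
  · by_cases hk : k = a <;> simp [hc, hk]
  · simp [hc, PySem.Dict.contains_insert, Bool.or_comm]

-- adjacency lists of addEdge
lemma pv_getD_addEdge (g : PvGraph) (a b w k : Int) :
    (pvAddEdge g a b w).getD k [] =
      (g.getD k [] ++ (if k = a then [(b, w)] else [])) ++ (if k = b then [(a, w)] else []) := by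
  by_cases hka : k = a
  · subst hka
    by_cases hkb : k = b
    · subst hkb
      simp [pvAddEdge, PySem.Dict.getD_modify, pv_getD_ensure]
    · simp [pvAddEdge, PySem.Dict.getD_modify, pv_getD_ensure, hkb, Ne.symm hkb]
  · by_cases hkb : k = b
    · subst hkb
      simp [pvAddEdge, PySem.Dict.getD_modify, pv_getD_ensure, hka, Ne.symm hka]
    · simp [pvAddEdge, PySem.Dict.getD_modify, pv_getD_ensure, hka, hkb]

lemma pv_contains_addEdge (g : PvGraph) (a b w k : Int) :
    (pvAddEdge g a b w).contains k = (g.contains k || k == a || k == b) := by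
  simp only [pvAddEdge, PySem.Dict.contains_modify]
  rw [pv_contains_ensure, pv_contains_ensure]
  cases hb : (k == b) <;> cases ha : (k == a) <;> cases hc : g.contains k <;> simp [hb, ha, hc]

lemma pv_good_addEdge {g : PvGraph} (hg : pvGood g) (a b w : Int) :
    pvGood (pvAddEdge g a b w) := by
  intro k q hq
  rw [pv_getD_addEdge] at hq
  rw [pv_contains_addEdge]
  rcases List.mem_append.1 hq with hq' | hq'
  · rcases List.mem_append.1 hq' with h1 | h2
    · simp [hg k q h1]
    · have hqe : q = (b, w) := by by_cases hka : k = a <;> simpa [hka] using h2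
      simp [hqe]
  · have hqe : q = (a, w) := by by_cases hkb : k = b <;> simpa [hkb] using hq'
    simp [hqe]

lemma pv_good_fold (l : List (Int × Int × Int)) :
    ∀ g : PvGraph, pvGood g → pvGood (l.foldl (fun g t => pvAddEdge g t.1 t.2.1 t.2.2) g) := by
  induction l with
  | nil => exact fun g hg => hg
  | cons t l ih => exact fun g hg => ih _ (pv_good_addEdge hg _ _ _)

lemma pv_good_build (mst : List (Int × Int × Int)) (e : Int × Int × Int) :
    pvGood (pvBuildGraph mst e) := by
  apply pv_good_addEdge
  apply pv_good_fold
  intro k q hq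
  simp [PySem.Dict.getD, PySem.Dict.get?_empty] at hq

lemma pv_build_contains_u (mst : List (Int × Int × Int)) (e : Int × Int × Int) :
    (pvBuildGraph mst e).contains e.1 = true := by
  simp [pvBuildGraph, pv_contains_addEdge]

lemma pv_build_mem (mst : List (Int × Int × Int)) (e : Int × Int × Int) :
    (e.2.1, e.2.2) ∈ (pvBuildGraph mst e).getD e.1 [] := by
  rw [pvBuildGraph, pv_getD_addEdge]
  simp

-- A's indexed consecutive pairs are zip(path, path[1:])
lemma pv_pairs (p : List Int) :
    (List.range (p.length - 1)).map (fun i => (p.getD i 0, p.getD (i+1) 0)) = p.zip p.tail := by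
  apply List.ext_getElem
  · simp [List.length_zip]
  · intro i h1 h2
    have hi : i < p.length - 1 := by simpa using h1
    have hip : i < p.length := by omega
    have hip1 : i + 1 < p.length := by omega
    have hit : i < p.tail.length := by simp [List.length_tail]; omega
    simp [List.getElem_zip, List.getElem_tail, List.getElem?_eq_getElem hip,
      List.getElem?_eq_getElem hip1]

-- B's single best-keeping fold is max?-with-key paired with its key value
lemma pv_maxfold_main (key : Int × Int → Int) :
    ∀ (l : List (Int × Int)) (mm : Int × Int),
      l.foldl (pvBestFold key) (some (key mm, mm))
        = (PySem.List.max? (mm :: l) key).map (fun x => (key x, x)) := by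
  intro l
  induction l with
  | nil => intro mm; simp [PySem.List.max?]
  | cons e t ih =>
    intro mm
    by_cases h : key mm < key e
    · simpa [PySem.List.max?, pvBestFold, h] using ih e
    · simpa [PySem.List.max?, pvBestFold, h] using ih mm

-- and started from None it is exactly max? paired with its key value
lemma pv_maxfold_none (key : Int × Int → Int) (l : List (Int × Int)) :
    l.foldl (pvBestFold key) none
      = (PySem.List.max? l key).map (fun x => (key x, x)) := by
  cases l with
  | nil => simp [PySem.List.max?]
  | cons e t => simpa [PySem.List.max?, pvBestFold] using pv_maxfold_main key t e

-- ===== VERDICT (by name: the statement is the Claim_ definition above) =====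
theorem update_mst_spec : Claim_equal_update_mst := by
  intro mst new_edge _ hpre
  have hpre' : ¬ new_edge.1 = new_edge.2.1 := hpre
  unfold Spec_update_mst
  have hgood : pvGood (pvBuildGraph mst new_edge) := pv_good_build mst new_edge
  have hcu := pv_build_contains_u mst new_edge
  have hmem := pv_build_mem mst new_edge
  have hvu : ¬ PySem.Set.contains (PySem.Set.add PySem.Set.empty new_edge.1) new_edge.2.1
      = true := by
    simp [PySem.Set.add, PySem.Set.empty, PySem.Set.contains, List.contains_eq_mem]
    exact fun h => hpre h.symm
  have hmu0 : pvMu (pvBuildGraph mst new_edge) (PySem.Set.add PySem.Set.empty new_edge.1)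
      ≤ (pvBuildGraph mst new_edge).keys.length := List.length_filter_le _ _
  rcases hdfs : pvDfs (pvBuildGraph mst new_edge) new_edge.2.1
      ((pvBuildGraph mst new_edge).keys.length + 1) new_edge.1 PySem.Set.empty []
    with ⟨b, vis2, p2⟩
  have hb : b = true := by
    rw [pvDfs, if_neg hpre'] at hdfs
    rcases hloop : pvDfsLoop (pvBuildGraph mst new_edge) new_edge.2.1
        (pvBuildGraph mst new_edge).keys.length
        ((pvBuildGraph mst new_edge).getD new_edge.1 [])
        (PySem.Set.add PySem.Set.empty new_edge.1) ([] ++ [new_edge.1])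
      with ⟨b2, vis3, p3⟩
    have hs := pv_loop_succ (pvBuildGraph mst new_edge) new_edge.2.1
        (pvBuildGraph mst new_edge).keys.length
        ((pvBuildGraph mst new_edge).getD new_edge.1 [])
        (PySem.Set.add PySem.Set.empty new_edge.1) ([] ++ [new_edge.1])
        hgood (fun q hq => hgood new_edge.1 q hq)
        (List.mem_map.2 ⟨(new_edge.2.1, new_edge.2.2), hmem, rfl⟩)
        hvu hmu0
    rw [hloop] at hdfs
    rw [hloop] at hs
    have hb2 : b2 = true := hs
    subst hb2
    simp only [Prod.mk.injEq] at hdfs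
    exact hdfs.1.symm
  subst hb
  have hlast : p2.getLast? = some new_edge.2.1 :=
    (pv_last_true (pvBuildGraph mst new_edge) new_edge.2.1
      ((pvBuildGraph mst new_edge).keys.length + 1)).1 new_edge.1 PySem.Set.empty [] vis2 p2 hdfs
  have hvu0 : ¬ PySem.Set.contains PySem.Set.empty new_edge.1 = true := by
    simp [PySem.Set.empty, PySem.Set.contains]
  have hcorr := pv_corr (pvBuildGraph mst new_edge) new_edge.2.1 hgood
      ((pvBuildGraph mst new_edge).keys.length + 1) new_edge.1 PySem.Set.empty [] []
      hcu hvu0 (by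
        have := List.length_filter_le
          (fun k => !(PySem.Set.contains PySem.Set.empty k)) (pvBuildGraph mst new_edge).keys
        simp only [pvMu]; omega)
  rw [hdfs] at hcorr
  have hcorr2 : pvStackLoop (pvBuildGraph mst new_edge) new_edge.2.1 [[new_edge.1]]
      PySem.Set.empty = some p2 := by simpa using hcorr
  simp only [update_mst, update_mst_alt]
  rw [hdfs, hcorr2]
  simp only [PySem.List.pyGet?_neg_one, hlast]
  simp only [if_true]
  simp only [pv_pairs]
  rw [pv_maxfold_none (fun e => ((((pvBuildGraph mst new_edge).getD e.1 []).find?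
        (fun q => q.1 == e.2)).map Prod.snd).getD 0) (p2.zip p2.tail)]
  rcases hmax : PySem.List.max? (p2.zip p2.tail)
      (fun e => ((((pvBuildGraph mst new_edge).getD e.1 []).find?
        (fun q => q.1 == e.2)).map Prod.snd).getD 0) with _ | me
  · simp [hmax]
  · simp [hmax]
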